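-- pv_equiv track=rewrite | github.com/davidgimenezs/fundamentos-de-programacion | 07. Numpy/ascendente_filas.py | tiene_secuencia_ascendente
-- ===== SOURCE A (Python) =====
-- def tiene_secuencia_ascendente(fila):
--     contador = 1
--     for i in range(1, len(fila)):
--         if fila[i] > fila[i-1]:
--             contador += 1
--             if contador >= 3:
--                 return True
--         else:
--             contador = 1
--     return False
-- ===== SOURCE B (Python) =====
-- def tiene_secuencia_ascendente(fila):
--     return any(a < b < c for a, b, c in zip(fila, fila[1:], fila[2:]))
-- ===== Notes on version B (the rewrite author's own statement) =====
-- stated objective: simpler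
-- what changed: Replaces the stateful run-length counter with a stateless scan of consecutive triples: an ascending run of length >= 3 exists iff some adjacent triple is strictly ascending.
import Mathlib
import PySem

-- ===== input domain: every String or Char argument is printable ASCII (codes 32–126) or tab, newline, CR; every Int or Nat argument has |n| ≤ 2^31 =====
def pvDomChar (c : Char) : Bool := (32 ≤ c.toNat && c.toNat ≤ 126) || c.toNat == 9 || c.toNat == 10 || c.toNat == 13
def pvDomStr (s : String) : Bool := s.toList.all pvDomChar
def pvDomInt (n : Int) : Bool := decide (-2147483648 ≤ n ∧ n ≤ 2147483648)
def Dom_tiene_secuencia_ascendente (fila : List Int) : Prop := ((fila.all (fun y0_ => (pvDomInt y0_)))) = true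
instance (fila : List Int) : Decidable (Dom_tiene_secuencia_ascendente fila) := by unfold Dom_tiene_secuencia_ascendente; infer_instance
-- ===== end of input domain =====

-- B replaces A's stateful run-length counter with a stateless scan of adjacent triples (simpler decomposition, same O(n) cost).

-- ===== PORT A =====
-- A's loop over i = 1 .. len-1, carrying contador and reading fila[i-1], ported as
-- structural recursion carrying the previous element and contador.
def tiene_secuencia_ascendente_loop (prev : Int) (contador : Int) : List Int → Bool
  | [] => false
  | x :: rest =>
    if x > prev then
      if contador + 1 ≥ 3 then true
      else tiene_secuencia_ascendente_loop x (contador + 1) rest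
    else tiene_secuencia_ascendente_loop x 1 rest

def tiene_secuencia_ascendente (fila : List Int) : Bool :=
  match fila with
  | [] => false
  | p :: rest => tiene_secuencia_ascendente_loop p 1 rest

-- ===== PORT B =====
-- any(a < b < c for a, b, c in zip(fila, fila[1:], fila[2:])): recursion over the triple windows.
def tiene_secuencia_ascendente_alt : List Int → Bool
  | a :: b :: c :: rest => (a < b && b < c) || tiene_secuencia_ascendente_alt (b :: c :: rest)
  | _ => false

-- ===== PRECONDITION & SPEC =====
def Spec_tiene_secuencia_ascendente (fila : List Int) (out : Bool) : Prop := out = tiene_secuencia_ascendente_alt fila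
instance (fila : List Int) (out : Bool) : Decidable (Spec_tiene_secuencia_ascendente fila out) := by unfold Spec_tiene_secuencia_ascendente; infer_instance

-- ===== CLAIM (what is proved, stated in full; the proofs are below) =====
def Claim_equal_tiene_secuencia_ascendente : Prop := ∀ (fila : List Int), Dom_tiene_secuencia_ascendente fila → Spec_tiene_secuencia_ascendente fila (tiene_secuencia_ascendente fila)

-- ===== LEMMAS AND PROOFS =====

theorem alt_cons_of_not_lt (p x : Int) (r : List Int) (h : ¬ p < x) :
    tiene_secuencia_ascendente_alt (p :: x :: r) = tiene_secuencia_ascendente_alt (x :: r) := by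
  cases r with
  | nil => simp [tiene_secuencia_ascendente_alt]
  | cons c r' => simp [tiene_secuencia_ascendente_alt, h]

theorem loop_eq_alt (rest : List Int) :
    (∀ p : Int, tiene_secuencia_ascendente_loop p 1 rest = tiene_secuencia_ascendente_alt (p :: rest)) ∧
    (∀ q p : Int, q < p → tiene_secuencia_ascendente_loop p 2 rest = tiene_secuencia_ascendente_alt (q :: p :: rest)) := by
  induction rest with
  | nil =>
    constructor
    · intro p; simp [tiene_secuencia_ascendente_loop, tiene_secuencia_ascendente_alt]
    · intro q p _; simp [tiene_secuencia_ascendente_loop, tiene_secuencia_ascendente_alt]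
  | cons x r ih =>
    obtain ⟨ih1, ih2⟩ := ih
    constructor
    · intro p
      by_cases h : x > p
      · have : tiene_secuencia_ascendente_loop p 1 (x :: r) = tiene_secuencia_ascendente_loop x 2 r := by
          simp [tiene_secuencia_ascendente_loop, h]
        rw [this, ih2 p x h]
      · have : tiene_secuencia_ascendente_loop p 1 (x :: r) = tiene_secuencia_ascendente_loop x 1 r := by
          simp [tiene_secuencia_ascendente_loop, h]
        rw [this, ih1 x, alt_cons_of_not_lt p x r h]
    · intro q p hqp
      by_cases h : x > p
      · have hl : tiene_secuencia_ascendente_loop p 2 (x :: r) = true := by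
          simp [tiene_secuencia_ascendente_loop, h]
        rw [hl]
        simp [tiene_secuencia_ascendente_alt, hqp, h]
      · have : tiene_secuencia_ascendente_loop p 2 (x :: r) = tiene_secuencia_ascendente_loop x 1 r := by
          simp [tiene_secuencia_ascendente_loop, h]
        rw [this, ih1 x]
        have h2 : tiene_secuencia_ascendente_alt (q :: p :: x :: r) = tiene_secuencia_ascendente_alt (p :: x :: r) := by
          simp [tiene_secuencia_ascendente_alt, h]
        rw [h2, alt_cons_of_not_lt p x r h]

-- ===== VERDICT (by name: the statement is the Claim_ definition above) =====
theorem tiene_secuencia_ascendente_spec : Claim_equal_tiene_secuencia_ascendente := by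
  intro fila _
  unfold Spec_tiene_secuencia_ascendente
  cases fila with
  | nil => rfl
  | cons p rest => exact (loop_eq_alt rest).1 p
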